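-- pv_equiv track=rewrite | github.com/ChinmayMittal/COL215 | Software Assignments/Assignment-2/file.py | value_list_to_all_terms
-- ===== SOURCE A (Python) =====
-- def value_list_to_all_terms(value_list, i):
--     if( i == len(value_list)):
--         return [""]
--     else:
--         temp_ans = value_list_to_all_terms(value_list, i+1)
--         if( value_list[i] == 0):
--             return [chr(97+i) + "'" + t for t in temp_ans ]
--         elif( value_list[i] == 1):
--             return [chr(97+i) + t for t in temp_ans ]
--         else:
--             return [chr(97+i) + "'" + t for t in temp_ans ] + [chr (97+i) + t for t in temp_ans ]
-- ===== SOURCE B (Python) =====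
-- def value_list_to_all_terms(value_list, i):
--     # Iterative: walk positions from the last index down to i, prepending the
--     # literal(s) for each position; don't-care duplicates the block (0-block first).
--     results = [""]
--     for idx in range(len(value_list) - 1, i - 1, -1):
--         v = value_list[idx]
--         lit0 = chr(97 + idx) + "'"
--         lit1 = chr(97 + idx)
--         if v == 0:
--             results = [lit0 + r for r in results]
--         elif v == 1:
--             results = [lit1 + r for r in results]
--         else:
--             results = [lit0 + r for r in results] + [lit1 + r for r in results]
--     return results
-- ===== Notes on version B (the rewrite author's own statement) =====
-- stated objective: simpler
-- what changed: Replaced the recursion from i up to len(value_list) by a single iterative loop over positions from len-1 down to i that prepends each position's literal(s) to an accumulated result list.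
import Mathlib
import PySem

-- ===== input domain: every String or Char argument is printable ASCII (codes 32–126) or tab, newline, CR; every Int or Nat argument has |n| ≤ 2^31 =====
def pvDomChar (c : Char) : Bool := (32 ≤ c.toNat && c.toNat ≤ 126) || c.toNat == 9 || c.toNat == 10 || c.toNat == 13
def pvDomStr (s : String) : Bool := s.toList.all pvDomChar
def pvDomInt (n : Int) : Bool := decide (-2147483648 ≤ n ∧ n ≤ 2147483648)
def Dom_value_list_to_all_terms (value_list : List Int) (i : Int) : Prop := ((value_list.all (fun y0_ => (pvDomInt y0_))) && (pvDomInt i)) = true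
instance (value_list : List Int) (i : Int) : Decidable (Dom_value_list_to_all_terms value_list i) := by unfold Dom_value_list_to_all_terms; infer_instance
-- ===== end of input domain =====

-- B replaces A's recursion by an iterative loop over positions len-1 down to i (simpler decomposition, same cost).


-- chr(97+i) as a one-character string (exact for 0 ≤ 97+i, guaranteed by Pre_)
def pvChr (n : Int) : String := String.mk [Char.ofNat n.toNat]

-- ===== PORT A =====
-- A recurses from i up to len(value_list); fuel (len-i).toNat+1 is exactly the recursion depth.
-- The fuel-0 and IndexError ([] results) branches are unreachable under Pre_.
def pvGoA (value_list : List Int) (i : Int) : Nat → List String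
  | 0 => []
  | fuel + 1 =>
    if i = (value_list.length : Int) then [""]
    else
      let temp_ans := pvGoA value_list (i + 1) fuel
      match PySem.List.pyGet? value_list i with
      | none => []  -- IndexError (outside Pre_)
      | some v =>
        if v = 0 then temp_ans.map (fun t => pvChr (97 + i) ++ "'" ++ t)
        else if v = 1 then temp_ans.map (fun t => pvChr (97 + i) ++ t)
        else temp_ans.map (fun t => pvChr (97 + i) ++ "'" ++ t) ++
             temp_ans.map (fun t => pvChr (97 + i) ++ t)

def value_list_to_all_terms (value_list : List Int) (i : Int) : List String :=
  pvGoA value_list i (((value_list.length : Int) - i).toNat + 1)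

-- ===== PORT B =====
def value_list_to_all_terms_alt (value_list : List Int) (i : Int) : List String :=
  (PySem.List.pyRange ((value_list.length : Int) - 1) (i - 1) (-1)).foldl
    (fun results idx =>
      match PySem.List.pyGet? value_list idx with
      | none => results  -- IndexError (outside Pre_)
      | some v =>
        let lit0 := pvChr (97 + idx) ++ "'"
        let lit1 := pvChr (97 + idx)
        if v = 0 then results.map (fun r => lit0 ++ r)
        else if v = 1 then results.map (fun r => lit1 ++ r)
        else results.map (fun r => lit0 ++ r) ++ results.map (fun r => lit1 ++ r))
    [""]

-- ===== PRECONDITION & SPEC =====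
-- A raises for i > len (infinite recursion → RecursionError), for i < -len (IndexError on
-- value_list[i]) and for i < -97 (ValueError in chr(97+i)); Pre_ excludes exactly those.
def Pre_value_list_to_all_terms (value_list : List Int) (i : Int) : Prop :=
  -(value_list.length : Int) ≤ i ∧ i ≤ (value_list.length : Int) ∧ -97 ≤ i
instance (value_list : List Int) (i : Int) : Decidable (Pre_value_list_to_all_terms value_list i) := by unfold Pre_value_list_to_all_terms; infer_instance
def pvWitness_value_list_to_all_terms : List Int × Int := ([0, 1, 2], 0)

def Spec_value_list_to_all_terms (value_list : List Int) (i : Int) (out : List String) : Prop := out = value_list_to_all_terms_alt value_list i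
instance (value_list : List Int) (i : Int) (out : List String) : Decidable (Spec_value_list_to_all_terms value_list i out) := by unfold Spec_value_list_to_all_terms; infer_instance

-- ===== CLAIM (what is proved, stated in full; the proofs are below) =====
def Claim_equal_value_list_to_all_terms : Prop := ∀ (value_list : List Int) (i : Int), Dom_value_list_to_all_terms value_list i → Pre_value_list_to_all_terms value_list i → Spec_value_list_to_all_terms value_list i (value_list_to_all_terms value_list i)

-- ===== LEMMAS AND PROOFS =====

-- range(a, b-1, -1) = range(a, b, -1) ++ [b]  (splitting off the last, smallest element)
theorem pvRange_neg_split (a b : Int) (h : b ≤ a) :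
    PySem.List.pyRange a (b - 1) (-1) = PySem.List.pyRange a b (-1) ++ [b] := by
  rw [PySem.List.pyRange_neg_one, PySem.List.pyRange_neg_one]
  have h1 : (a - (b - 1)).toNat = (a - b).toNat + 1 := by omega
  rw [h1, List.range_succ, List.map_append]
  simp only [List.map_cons, List.map_nil]
  have hb : a - ((a - b).toNat : Int) = b := by omega
  rw [hb]

theorem pvGoA_eq_alt (value_list : List Int) :
    ∀ (fuel : Nat) (i : Int), -(value_list.length : Int) ≤ i → i ≤ (value_list.length : Int) →
      ((value_list.length : Int) - i).toNat ≤ fuel →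
      pvGoA value_list i (fuel + 1) = value_list_to_all_terms_alt value_list i := by
  intro fuel
  induction fuel with
  | zero =>
    intro i h1 h2 hf
    have hi : i = (value_list.length : Int) := by omega
    subst hi
    rw [value_list_to_all_terms_alt, PySem.List.pyRange_neg_one_eq_nil (by omega)]
    simp [pvGoA]
  | succ f ih =>
    intro i h1 h2 hf
    by_cases hi : i = (value_list.length : Int)
    · subst hi
      rw [value_list_to_all_terms_alt, PySem.List.pyRange_neg_one_eq_nil (by omega)]
      simp [pvGoA]
    · have hlt : i < (value_list.length : Int) := lt_of_le_of_ne h2 hi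
      have htemp : pvGoA value_list (i + 1) (f + 1) = value_list_to_all_terms_alt value_list (i + 1) :=
        ih (i + 1) (by omega) (by omega) (by omega)
      -- the loop list at i splits as (loop list at i+1) ++ [i]
      have hsplit : PySem.List.pyRange ((value_list.length : Int) - 1) (i - 1) (-1)
          = PySem.List.pyRange ((value_list.length : Int) - 1) ((i + 1) - 1) (-1) ++ [i] := by
        have := pvRange_neg_split ((value_list.length : Int) - 1) i (by omega)
        simpa using this
      have hget : ∃ v, PySem.List.pyGet? value_list i = some v := by
        cases hg : PySem.List.pyGet? value_list i with
        | none =>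
          rw [PySem.List.pyGet?_eq_none_iff] at hg
          exact absurd (by unfold PySem.Raise.InRange; omega) hg
        | some v => exact ⟨v, rfl⟩
      obtain ⟨v, hv⟩ := hget
      show pvGoA value_list i (f + 1 + 1) = value_list_to_all_terms_alt value_list i
      rw [pvGoA, if_neg hi]
      rw [value_list_to_all_terms_alt, hsplit, List.foldl_append]
      rw [htemp, value_list_to_all_terms_alt]
      simp only [List.foldl_cons, List.foldl_nil, hv]

-- ===== VERDICT (by name: the statement is the Claim_ definition above) =====
theorem value_list_to_all_terms_spec : Claim_equal_value_list_to_all_terms := by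
  intro value_list i _ hpre
  obtain ⟨h1, h2, _⟩ := hpre
  show value_list_to_all_terms value_list i = value_list_to_all_terms_alt value_list i
  rw [value_list_to_all_terms]
  exact pvGoA_eq_alt value_list _ i h1 h2 (le_refl _)
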